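-- pv_equiv track=rewrite | github.com/vnagpal25/aoc-2025 | 2025/code/4.py | part2
-- ===== SOURCE A (Python) =====
-- def part2(puzzle: str):
--     grid = [
--         [0] + [1 if char == "@" else 0 for char in string] + [0]
--         for string in puzzle.splitlines()
--     ]
--     grid = [[0] * len(grid[0])] + grid + [[0] * len(grid[0])]
--
--     can_remove = True
--     total_accessible = 0
--     while can_remove:
--         accessible = 0
--         removeable_squares = []
--         for i, row in enumerate(grid):
--             for j, cell in enumerate(row):
--                 # if no roll in the cell
--                 if not cell:
--                     continue
--                 # sum eight adjacent
--                 tot = (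
--                     sum(grid[i + di][j + dj] for di in (-1, 0, 1) for dj in (-1, 0, 1))
--                     - 1
--                 )
--                 if tot < 4:
--                     removeable_squares.append((i, j))
--                     accessible += 1
--
--         for i, j in removeable_squares:
--             grid[i][j] = 0
--
--         can_remove = bool(accessible)
--         total_accessible += accessible
--
--     return total_accessible
-- ===== SOURCE B (Python) =====
-- NB = [(-1, -1), (-1, 0), (-1, 1), (0, -1), (0, 1), (1, -1), (1, 0), (1, 1)]
--
--
-- def part2(puzzle: str):
--     live = {
--         (i, j)
--         for i, line in enumerate(puzzle.splitlines())
--         for j, ch in enumerate(line)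
--         if ch == "@"
--     }
--     total = 0
--     cand = set(live)
--     while True:
--         removable = {
--             (i, j)
--             for i, j in cand
--             if (i, j) in live
--             and ((i - 1, j - 1) in live) + ((i - 1, j) in live)
--             + ((i - 1, j + 1) in live) + ((i, j - 1) in live)
--             + ((i, j + 1) in live) + ((i + 1, j - 1) in live)
--             + ((i + 1, j) in live) + ((i + 1, j + 1) in live) < 4
--         }
--         if not removable:
--             return total
--         total += len(removable)
--         live -= removable
--         cand = {(i + a, j + b) for i, j in removable for a, b in NB}
-- ===== Notes on version B (the rewrite author's own statement) =====
-- stated objective: faster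
-- what changed: A rescans the whole padded grid every round to find removable cells; B keeps the live cells in a set and after the first round re-examines only candidates adjacent to cells removed in the previous round, so total work is proportional to the grid plus removals instead of grid-size times number of rounds.
import Mathlib
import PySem

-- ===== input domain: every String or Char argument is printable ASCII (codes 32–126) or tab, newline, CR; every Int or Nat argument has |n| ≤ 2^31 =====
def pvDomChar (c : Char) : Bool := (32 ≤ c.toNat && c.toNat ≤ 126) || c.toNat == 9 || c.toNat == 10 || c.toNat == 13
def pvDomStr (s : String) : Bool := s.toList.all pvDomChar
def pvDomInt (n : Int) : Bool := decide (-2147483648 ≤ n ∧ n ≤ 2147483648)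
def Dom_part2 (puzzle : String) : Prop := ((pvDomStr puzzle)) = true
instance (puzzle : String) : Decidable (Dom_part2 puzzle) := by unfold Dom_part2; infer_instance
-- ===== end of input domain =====

-- B replaces A's whole-grid rescan per round by frontier-restricted rounds: after the first
-- round only neighbours of just-removed cells are re-examined (objective: faster).

-- ===== PORT A =====
-- grid = [[0] + [1 if char == "@" else 0 for char in string] + [0] for string in puzzle.splitlines()]
def pvGrid0 (puzzle : String) : List (List Int) :=
  (PySem.Str.splitlines puzzle).map (fun s => [0] ++ s.toList.map (fun c => if c == '@' then 1 else 0) ++ [0])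

-- grid = [[0] * len(grid[0])] + grid + [[0] * len(grid[0])]
def pvGridA (puzzle : String) : List (List Int) :=
  let g := pvGrid0 puzzle
  let pad : List Int := List.replicate (PySem.List.pyGetD g 0 []).length 0
  [pad] ++ g ++ [pad]

-- grid[i + di][j + dj] (in range on every evaluated access for inputs satisfying Pre_)
def pvCellA (grid : List (List Int)) (i j : Int) : Int :=
  PySem.List.pyGetD (PySem.List.pyGetD grid i []) j 0

-- tot = sum(grid[i+di][j+dj] for di in (-1,0,1) for dj in (-1,0,1)) - 1
def pvTot (grid : List (List Int)) (i j : Int) : Int :=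
  (([-1, 0, 1] : List Int).flatMap (fun di =>
    (([-1, 0, 1] : List Int).map (fun dj => pvCellA grid (i + di) (j + dj))))).sum - 1

-- the two nested 'for … in enumerate' loops collecting (accessible, removeable_squares)
def pvScan (grid : List (List Int)) : Int × List (Int × Int) :=
  (PySem.List.enumerate grid 0).foldl (fun acc p =>
    (PySem.List.enumerate p.2 0).foldl (fun acc2 q =>
      if q.2 == 0 then acc2
      else if pvTot grid p.1 q.1 < 4 then (acc2.1 + 1, acc2.2 ++ [(p.1, q.1)])
      else acc2) acc) ((0 : Int), ([] : List (Int × Int)))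

-- for i, j in removeable_squares: grid[i][j] = 0
def pvRemove (grid : List (List Int)) (rem : List (Int × Int)) : List (List Int) :=
  rem.foldl (fun g c =>
    PySem.List.pySetD g c.1 (PySem.List.pySetD (PySem.List.pyGetD g c.1 []) c.2 0)) grid

-- the while loop (fuel = number of characters + 1 never runs out: each continuing round removes a cell)
def pvLoopA (fuel : Nat) (grid : List (List Int)) (total : Int) : Int :=
  match fuel with
  | 0 => total
  | f + 1 =>
    let s := pvScan grid
    let g' := pvRemove grid s.2
    let total' := total + s.1
    if s.1 == 0 then total' else pvLoopA f g' total'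

def part2 (puzzle : String) : Int := pvLoopA (puzzle.toList.length + 1) (pvGridA puzzle) 0

-- ===== PORT B =====
-- NB = [(-1,-1),(-1,0),(-1,1),(0,-1),(0,1),(1,-1),(1,0),(1,1)]
def pvNB : List (Int × Int) := [(-1, -1), (-1, 0), (-1, 1), (0, -1), (0, 1), (1, -1), (1, 0), (1, 1)]

-- live = {(i, j) for i, line in enumerate(puzzle.splitlines()) for j, ch in enumerate(line) if ch == "@"}
def pvAts (puzzle : String) : PySem.Set (Int × Int) :=
  PySem.Set.ofList ((PySem.List.enumerate (PySem.Str.splitlines puzzle) 0).flatMap (fun p =>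
    ((PySem.List.enumerate p.2.toList 0).filter (fun q => q.2 == '@')).map (fun q => (p.1, q.1))))

-- ((i-1,j-1) in live) + … + ((i+1,j+1) in live)  (sum of the eight membership tests)
def pvCnt (live : PySem.Set (Int × Int)) (i j : Int) : Int :=
  (if PySem.Set.contains live (i - 1, j - 1) then 1 else 0)
  + (if PySem.Set.contains live (i - 1, j) then 1 else 0)
  + (if PySem.Set.contains live (i - 1, j + 1) then 1 else 0)
  + (if PySem.Set.contains live (i, j - 1) then 1 else 0)
  + (if PySem.Set.contains live (i, j + 1) then 1 else 0)
  + (if PySem.Set.contains live (i + 1, j - 1) then 1 else 0)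
  + (if PySem.Set.contains live (i + 1, j) then 1 else 0)
  + (if PySem.Set.contains live (i + 1, j + 1) then 1 else 0)

-- removable = {(i,j) for i, j in cand if (i,j) in live and <eight-test sum> < 4}
def pvRemovable (live cand : PySem.Set (Int × Int)) : PySem.Set (Int × Int) :=
  PySem.Set.ofList (cand.filter (fun c =>
    PySem.Set.contains live c && decide (pvCnt live c.1 c.2 < 4)))

-- the while True loop (fuel as in port A)
def pvLoopB (fuel : Nat) (live cand : PySem.Set (Int × Int)) (total : Int) : Int :=
  match fuel with
  | 0 => total
  | f + 1 =>
    let rem := pvRemovable live cand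
    if rem.isEmpty then total
    else pvLoopB f (PySem.Set.diff live rem)
      (PySem.Set.ofList (rem.flatMap (fun c => pvNB.map (fun d => (c.1 + d.1, c.2 + d.2)))))
      (total + (rem.length : Int))

def part2_alt (puzzle : String) : Int :=
  let live := pvAts puzzle
  pvLoopB (puzzle.toList.length + 1) live (PySem.Set.ofList live) 0

-- ===== PRECONDITION & SPEC =====
-- Pre_ excludes exactly the inputs where A raises (IndexError): the empty string (grid[0] of an
-- empty list) and ragged inputs where some live cell sits beyond the end of the line above it, the
-- line below it, or — for cells of the last line — beyond the end of the first line (whose length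
-- the padding rows take).
def Pre_part2 (puzzle : String) : Prop :=
  let ls := PySem.Str.splitlines puzzle
  ls ≠ [] ∧ ∀ p ∈ PySem.List.enumerate ls 0, ∀ q ∈ PySem.List.enumerate p.2.toList 0,
    q.2 = '@' →
      (p.1 = 0 ∨ q.1 < (PySem.List.pyGetD ls (p.1 - 1) "").toList.length) ∧
      (if p.1 = (ls.length : Int) - 1 then q.1 < (PySem.List.pyGetD ls 0 "").toList.length
       else q.1 < (PySem.List.pyGetD ls (p.1 + 1) "").toList.length)
instance (puzzle : String) : Decidable (Pre_part2 puzzle) := by unfold Pre_part2; infer_instance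

def pvWitness_part2 : String := "@@\n@@"

def Spec_part2 (puzzle : String) (out : Int) : Prop := out = part2_alt puzzle
instance (puzzle : String) (out : Int) : Decidable (Spec_part2 puzzle out) := by unfold Spec_part2; infer_instance

-- ===== CLAIM (what is proved, stated in full; the proofs are below) =====
def Claim_equal_part2 : Prop := ∀ (puzzle : String), Dom_part2 puzzle → Pre_part2 puzzle → Spec_part2 puzzle (part2 puzzle)

-- ===== LEMMAS AND PROOFS =====

-- membership predicate of a live-cell list, as a function of (row, column)
def pvMemP (live : List (Int × Int)) : Int → Int → Bool := fun i j => PySem.Set.contains live (i, j)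

def pvPad (ls : List String) : List Int := List.replicate ((PySem.List.pyGetD ls 0 "").toList.length + 2) 0

def pvLen (ls : List String) (i : Nat) : Nat := (ls.getD i "").toList.length

def pvBit (P : Int → Int → Bool) (i : Int) (j : Nat) : Int := if P i (j : Int) then 1 else 0

def pvRowP (P : Int → Int → Bool) (i : Int) (L : Nat) : List Int :=
  [0] ++ (List.range L).map (pvBit P i) ++ [0]

-- the grid A maintains, parametrised by the live-cell predicate
def pvMkP (ls : List String) (P : Int → Int → Bool) : List (List Int) :=
  [pvPad ls] ++ (List.range ls.length).map (fun (i : Nat) => pvRowP P (i : Int) (pvLen ls i)) ++ [pvPad ls]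

-- the predicate only holds inside the (unpadded) grid
def pvPB (ls : List String) (P : Int → Int → Bool) : Prop :=
  ∀ a b : Int, P a b = true → 0 ≤ a ∧ a < (ls.length : Int) ∧ 0 ≤ b ∧ b < (pvLen ls a.toNat : Int)

def pvBnd (ls : List String) (live : List (Int × Int)) : Prop :=
  ∀ c ∈ live, 0 ≤ c.1 ∧ c.1 < (ls.length : Int) ∧ 0 ≤ c.2 ∧ c.2 < (pvLen ls c.1.toNat : Int)

-- the row-major list of removable positions A's scan produces
def pvLlist (g : List (List Int)) : List (Int × Int) :=
  (PySem.List.enumerate g 0).flatMap (fun p =>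
    ((PySem.List.enumerate p.2 0).filter (fun q => !(q.2 == 0) && decide (pvTot g p.1 q.1 < 4))).map
      (fun q => (p.1, q.1)))

lemma pvPB_of_bnd (ls : List String) (live : List (Int × Int)) (hB : pvBnd ls live) :
    pvPB ls (pvMemP live) := by
  intro a b h
  have hm : (a, b) ∈ live := (PySem.Set.contains_iff live (a, b)).mp h
  exact hB (a, b) hm

lemma pvMkP_congr (ls : List String) (P Q : Int → Int → Bool) (h : ∀ a b, P a b = Q a b) :
    pvMkP ls P = pvMkP ls Q := by
  have : P = Q := funext fun a => funext fun b => h a b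
  rw [this]

lemma pvMkP_length (ls : List String) (P : Int → Int → Bool) :
    (pvMkP ls P).length = ls.length + 2 := by
  simp [pvMkP]

lemma pvPad_getD (ls : List String) (j : Nat) : (pvPad ls).getD j 0 = 0 := by
  simp only [pvPad, List.getD_eq_getElem?_getD, List.getElem?_replicate]
  split <;> rfl

lemma pvMkP_getD_zero (ls : List String) (P : Int → Int → Bool) :
    (pvMkP ls P).getD 0 [] = pvPad ls := by
  rfl

lemma pvMkP_getD_mid (ls : List String) (P : Int → Int → Bool) {k : Nat} (hk : k < ls.length) :
    (pvMkP ls P).getD (k + 1) [] = pvRowP P (k : Int) (pvLen ls k) := by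
  have hb : k < ((List.range ls.length).map (fun (i : Nat) => pvRowP P (i : Int) (pvLen ls i))).length := by
    simpa using hk
  simp [pvMkP, List.getD_eq_getElem?_getD, List.getElem?_append, hb, hk]

lemma pvMkP_getD_last (ls : List String) (P : Int → Int → Bool) :
    (pvMkP ls P).getD (ls.length + 1) [] = pvPad ls := by
  have hb : ¬ ls.length < ((List.range ls.length).map (fun (i : Nat) => pvRowP P (i : Int) (pvLen ls i))).length := by simp
  simp [pvMkP, List.getD_eq_getElem?_getD, List.getElem?_append]

lemma pvMkP_getD_big (ls : List String) (P : Int → Int → Bool) {k : Nat} (hk : ls.length + 1 < k) :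
    (pvMkP ls P).getD k [] = [] := by
  have h1 : (pvMkP ls P).length ≤ k := by rw [pvMkP_length]; omega
  simp [List.getD_eq_getElem?_getD, List.getElem?_eq_none_iff.mpr h1]

lemma pvRowP_length (P : Int → Int → Bool) (i : Int) (L : Nat) :
    (pvRowP P i L).length = L + 2 := by
  simp [pvRowP]

lemma pvRowP_getD_zero (P : Int → Int → Bool) (i : Int) (L : Nat) :
    (pvRowP P i L).getD 0 0 = 0 := by
  rfl

lemma pvRowP_getD_mid (P : Int → Int → Bool) (i : Int) {L t : Nat} (ht : t < L) :
    (pvRowP P i L).getD (t + 1) 0 = if P i (t : Int) then 1 else 0 := by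
  have hlt : t + 1 < (pvRowP P i L).length := by rw [pvRowP_length]; omega
  rw [List.getD_eq_getElem _ _ hlt]
  simp [pvRowP, List.getElem_append, ht, pvBit]

lemma pvRowP_getD_hi (P : Int → Int → Bool) (i : Int) {L t : Nat} (ht : L < t) :
    (pvRowP P i L).getD t 0 = 0 := by
  rcases Nat.lt_or_ge t (L + 2) with h | h
  · have ht1 : t = L + 1 := by omega
    subst ht1
    simp [pvRowP, List.getD_eq_getElem?_getD, List.getElem?_append]
  · have h1 : (pvRowP P i L).length ≤ t := by rw [pvRowP_length]; omega
    simp [List.getD_eq_getElem?_getD, List.getElem?_eq_none_iff.mpr h1]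

-- the central cell-value lemma: any nonnegative access into the maintained grid
lemma pvCellA_mkP (ls : List String) (P : Int → Int → Bool) (hP : pvPB ls P) {i j : Int}
    (hi : 0 ≤ i) (hj : 0 ≤ j) :
    pvCellA (pvMkP ls P) i j = if P (i - 1) (j - 1) then 1 else 0 := by
  have hPf : ∀ a b : Int, (a < 0 ∨ b < 0 ∨ (ls.length : Int) ≤ a ∨ (pvLen ls a.toNat : Int) ≤ b) →
      P a b = false := by
    intro a b hab
    cases h : P a b with
    | false => rfl
    | true => exact absurd (hP a b h) (by omega)
  obtain ⟨k, rfl⟩ : ∃ k : Nat, i = (k : Int) := ⟨i.toNat, by omega⟩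
  obtain ⟨t, rfl⟩ : ∃ t : Nat, j = (t : Int) := ⟨j.toNat, by omega⟩
  simp only [pvCellA, PySem.List.pyGetD_natCast]
  cases k with
  | zero =>
    rw [pvMkP_getD_zero, pvPad_getD, hPf _ _ (by omega)]
    rfl
  | succ m =>
    rcases Nat.lt_or_ge m ls.length with hm | hm
    · rw [pvMkP_getD_mid ls P hm]
      cases t with
      | zero =>
        rw [pvRowP_getD_zero, hPf _ _ (by omega)]
        rfl
      | succ u =>
        have hc1 : ((m + 1 : Nat) : Int) - 1 = (m : Int) := by push_cast; ring
        have hc2 : ((u + 1 : Nat) : Int) - 1 = (u : Int) := by push_cast; ring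
        rcases Nat.lt_or_ge u (pvLen ls m) with hu | hu
        · rw [pvRowP_getD_mid P _ hu, hc1, hc2]
        · rw [pvRowP_getD_hi P _ (by omega), hc1, hc2, hPf _ _ (by right; right; right; simp; omega)]
          rfl
    · rcases Nat.eq_or_lt_of_le hm with he | hlt
      · rw [← he, pvMkP_getD_last, pvPad_getD, hPf _ _ (by omega)]
        rfl
      · rw [pvMkP_getD_big ls P (by omega)]
        rw [hPf _ _ (by omega)]
        rfl

-- A's 3×3 sum minus one equals B's eight membership tests
lemma pvTot_mkP (ls : List String) (live : List (Int × Int)) (hB : pvBnd ls live) {i j : Int}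
    (hlive : (i, j) ∈ live) :
    pvTot (pvMkP ls (pvMemP live)) (i + 1) (j + 1) = pvCnt live i j := by
  have hP := pvPB_of_bnd ls live hB
  obtain ⟨h1, h2, h3, h4⟩ := hB (i, j) hlive
  have hv : ∀ a b : Int, 0 ≤ a → 0 ≤ b →
      pvCellA (pvMkP ls (pvMemP live)) a b = if pvMemP live (a - 1) (b - 1) then 1 else 0 :=
    fun a b ha hb => pvCellA_mkP ls (pvMemP live) hP ha hb
  simp only [pvTot, List.flatMap_cons, List.flatMap_nil, List.map_cons, List.map_nil,
    List.sum_append, List.sum_cons, List.sum_nil]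
  rw [hv _ _ (by omega) (by omega), hv _ _ (by omega) (by omega), hv _ _ (by omega) (by omega),
    hv _ _ (by omega) (by omega), hv _ _ (by omega) (by omega), hv _ _ (by omega) (by omega),
    hv _ _ (by omega) (by omega), hv _ _ (by omega) (by omega), hv _ _ (by omega) (by omega)]
  have e1 : (i + 1 + -1 - 1 : Int) = i - 1 := by ring
  have e2 : (i + 1 + 0 - 1 : Int) = i := by ring
  have e3 : (i + 1 + 1 - 1 : Int) = i + 1 := by ring
  have f1 : (j + 1 + -1 - 1 : Int) = j - 1 := by ring
  have f2 : (j + 1 + 0 - 1 : Int) = j := by ring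
  have f3 : (j + 1 + 1 - 1 : Int) = j + 1 := by ring
  rw [e1, e2, e3, f1, f2, f3]
  have hself : pvMemP live i j = true := by
    simp only [pvMemP]
    exact (PySem.Set.contains_iff live (i, j)).mpr hlive
  rw [hself]
  simp only [pvCnt, pvMemP, if_true]
  ring_nf

-- A's nested scan loops return the row-major removable list and its length
lemma pvScan_eq (g : List (List Int)) : pvScan g = (((pvLlist g).length : Int), pvLlist g) := by
  have hinner : ∀ (p : Int × List Int) (acc : Int × List (Int × Int)),
      (PySem.List.enumerate p.2 0).foldl (fun acc2 q =>
        if q.2 == 0 then acc2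
        else if pvTot g p.1 q.1 < 4 then (acc2.1 + 1, acc2.2 ++ [(p.1, q.1)])
        else acc2) acc =
      (acc.1 + ((PySem.List.enumerate p.2 0).countP
          (fun q => !(q.2 == 0) && decide (pvTot g p.1 q.1 < 4)) : Int),
       acc.2 ++ ((PySem.List.enumerate p.2 0).filter
          (fun q => !(q.2 == 0) && decide (pvTot g p.1 q.1 < 4))).map (fun q => (p.1, q.1))) := by
    intro p acc
    have hfe : (fun (acc2 : Int × List (Int × Int)) (q : Int × Int) =>
        if q.2 == 0 then acc2
        else if pvTot g p.1 q.1 < 4 then (acc2.1 + 1, acc2.2 ++ [(p.1, q.1)])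
        else acc2) =
        (fun acc2 q =>
          (if (!(q.2 == 0) && decide (pvTot g p.1 q.1 < 4)) then acc2.1 + 1 else acc2.1,
           if (!(q.2 == 0) && decide (pvTot g p.1 q.1 < 4)) then acc2.2 ++ [(p.1, q.1)] else acc2.2)) := by
      funext acc2 q
      by_cases h1 : q.2 == 0 <;> by_cases h2 : pvTot g p.1 q.1 < 4 <;> simp [h1, h2]
    obtain ⟨a, b⟩ := acc
    rw [hfe,
      PySem.List.foldl_prod_mk
        (f := fun (a : Int) (q : Int × Int) => if (!(q.2 == 0) && decide (pvTot g p.1 q.1 < 4)) then a + 1 else a)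
        (g := fun (b : List (Int × Int)) (q : Int × Int) => if (!(q.2 == 0) && decide (pvTot g p.1 q.1 < 4)) then b ++ [(p.1, q.1)] else b),
      PySem.List.foldl_if_add_one, PySem.List.foldl_append_if]
  have houter : (fun (acc : Int × List (Int × Int)) (p : Int × List Int) =>
      (PySem.List.enumerate p.2 0).foldl (fun acc2 q =>
        if q.2 == 0 then acc2
        else if pvTot g p.1 q.1 < 4 then (acc2.1 + 1, acc2.2 ++ [(p.1, q.1)])
        else acc2) acc) =
      (fun acc p =>
        (acc.1 + ((PySem.List.enumerate p.2 0).countP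
            (fun q => !(q.2 == 0) && decide (pvTot g p.1 q.1 < 4)) : Int),
         acc.2 ++ ((PySem.List.enumerate p.2 0).filter
            (fun q => !(q.2 == 0) && decide (pvTot g p.1 q.1 < 4))).map (fun q => (p.1, q.1)))) := by
    funext acc p
    exact hinner p acc
  show (PySem.List.enumerate g 0).foldl _ ((0 : Int), ([] : List (Int × Int))) = _
  rw [houter,
    PySem.List.foldl_prod_mk
      (f := fun (a : Int) (p : Int × List Int) => a + ((PySem.List.enumerate p.2 0).countP
          (fun q => !(q.2 == 0) && decide (pvTot g p.1 q.1 < 4)) : Int))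
      (g := fun (b : List (Int × Int)) (p : Int × List Int) => b ++ ((PySem.List.enumerate p.2 0).filter
          (fun q => !(q.2 == 0) && decide (pvTot g p.1 q.1 < 4))).map (fun q => (p.1, q.1))),
    PySem.List.foldl_add, PySem.List.foldl_append_eq_flatMap]
  rw [Prod.mk.injEq]
  refine ⟨?_, ?_⟩
  · show (0 : Int) + _ = _
    rw [zero_add, pvLlist, List.length_flatMap, Nat.cast_list_sum, List.map_map]
    congr 1
    apply List.map_congr_left
    intro p _
    simp [List.countP_eq_length_filter]
  · show ([] : List (Int × Int)) ++ _ = _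
    rw [List.nil_append, pvLlist]

lemma pvLlist_nodup (g : List (List Int)) : (pvLlist g).Nodup := by
  rw [pvLlist, List.nodup_flatMap]
  refine ⟨?_, ?_⟩
  · intro p _
    have h1 : (((PySem.List.enumerate p.2 0).filter
        (fun q => !(q.2 == 0) && decide (pvTot g p.1 q.1 < 4)))).Pairwise
          (fun a b : Int × Int => a.1 < b.1) :=
      List.Pairwise.sublist List.filter_sublist (PySem.List.pairwise_lt_enumerate p.2 0)
    have h2 : (((PySem.List.enumerate p.2 0).filter
        (fun q => !(q.2 == 0) && decide (pvTot g p.1 q.1 < 4))).map (fun q => (p.1, q.1))).Pairwise (· ≠ ·) :=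
      (List.pairwise_map).mpr (h1.imp (fun {a b} hlt => by
        intro e
        have : a.1 = b.1 := congrArg Prod.snd e
        omega))
    exact h2
  · exact (PySem.List.pairwise_lt_enumerate g 0).imp (fun {p q} hlt => by
      intro a hpa hqa
      obtain ⟨x, -, hx⟩ := List.mem_map.mp hpa
      obtain ⟨y, -, hy⟩ := List.mem_map.mp hqa
      have h1 : a.1 = p.1 := by rw [← hx]
      have h2 : a.1 = q.1 := by rw [← hy]
      omega)

-- membership in A's removable list ⟺ a live cell with fewer than 4 live neighbours, shifted by the padding
lemma pvLlist_mem (ls : List String) (live : List (Int × Int)) (hB : pvBnd ls live)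
    (a : Int × Int) :
    a ∈ pvLlist (pvMkP ls (pvMemP live)) ↔
      ∃ c ∈ live, pvCnt live c.1 c.2 < 4 ∧ a = (c.1 + 1, c.2 + 1) := by
  constructor
  · intro ha
    rw [pvLlist, List.mem_flatMap] at ha
    obtain ⟨p, hp, hpa⟩ := ha
    rw [PySem.List.mem_enumerate_iff] at hp
    obtain ⟨k, hk, rfl⟩ := hp
    rw [List.mem_map] at hpa
    obtain ⟨q, hq, rfl⟩ := hpa
    rw [List.mem_filter] at hq
    obtain ⟨hq1, hq2⟩ := hq
    rw [PySem.List.mem_enumerate_iff] at hq1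
    obtain ⟨t, ht, rfl⟩ := hq1
    rw [Bool.and_eq_true, Bool.not_eq_eq_eq_not, Bool.not_true, beq_eq_false_iff_ne,
      decide_eq_true_eq] at hq2
    obtain ⟨hne, htot⟩ := hq2
    dsimp only at ht hne htot
    rw [pvMkP_length] at hk
    have hrow : ∀ (m : Nat), m < ls.length → ∀ (hb : m + 1 < (pvMkP ls (pvMemP live)).length),
        (pvMkP ls (pvMemP live))[m + 1]'hb = pvRowP (pvMemP live) (m : Int) (pvLen ls m) := by
      intro m hm hb
      rw [← List.getD_eq_getElem _ ([] : List Int), pvMkP_getD_mid ls _ hm]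
    rcases Nat.eq_zero_or_pos k with rfl | hkpos
    · exfalso
      apply hne
      have h0 : (pvMkP ls (pvMemP live))[0]'(by rw [pvMkP_length]; omega) = pvPad ls := by
        rw [← List.getD_eq_getElem _ ([] : List Int), pvMkP_getD_zero]
      rw [List.getElem_of_eq h0 ht, ← List.getD_eq_getElem _ (0 : Int), pvPad_getD]
    rcases Nat.lt_or_ge k (ls.length + 1) with hkm | hkm
    · obtain ⟨m, rfl⟩ : ∃ m : Nat, k = m + 1 := ⟨k - 1, by omega⟩
      have hm : m < ls.length := by omega
      simp only [hrow m hm] at ht hne htot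
      have htlen : t < pvLen ls m + 2 := by
        have := ht; rwa [pvRowP_length] at this
      rcases Nat.eq_zero_or_pos t with rfl | htpos
      · exact absurd (by rw [← List.getD_eq_getElem _ (0 : Int), pvRowP_getD_zero]) hne
      rcases Nat.lt_or_ge t (pvLen ls m + 1) with htm | htm
      · obtain ⟨u, rfl⟩ : ∃ u : Nat, t = u + 1 := ⟨t - 1, by omega⟩
        have hu : u < pvLen ls m := by omega
        rw [← List.getD_eq_getElem _ (0 : Int), pvRowP_getD_mid _ _ hu] at hne
        have hPmu : pvMemP live (m : Int) (u : Int) = true := by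
          cases h : pvMemP live (m : Int) (u : Int) with
          | true => rfl
          | false => rw [h] at hne; simp at hne
        have hc : ((m : Int), (u : Int)) ∈ live :=
          (PySem.Set.contains_iff live _).mp hPmu
        refine ⟨((m : Int), (u : Int)), hc, ?_, ?_⟩
        · dsimp only
          have := pvTot_mkP ls live hB hc
          rw [show ((m : Int) + 1) = (0 : Int) + ((m + 1 : Nat) : Int) from by push_cast; ring,
            show ((u : Int) + 1) = (0 : Int) + ((u + 1 : Nat) : Int) from by push_cast; ring] at this
          omega
        · dsimp only
          simp only [Prod.mk.injEq]
          constructor <;> push_cast <;> ring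
      · exfalso
        apply hne
        rw [← List.getD_eq_getElem _ (0 : Int), pvRowP_getD_hi _ _ (by omega)]
    · have hke : k = ls.length + 1 := by omega
      subst hke
      exfalso
      apply hne
      have h0 : (pvMkP ls (pvMemP live))[ls.length + 1]'(by rw [pvMkP_length]; omega) = pvPad ls := by
        rw [← List.getD_eq_getElem _ ([] : List Int), pvMkP_getD_last]
      rw [List.getElem_of_eq h0 ht, ← List.getD_eq_getElem _ (0 : Int), pvPad_getD]
  · rintro ⟨c, hc, hcnt, rfl⟩
    obtain ⟨h1, h2, h3, h4⟩ := hB c hc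
    obtain ⟨m, hm⟩ : ∃ m : Nat, c.1 = (m : Int) := ⟨c.1.toNat, by omega⟩
    obtain ⟨u, hu⟩ : ∃ u : Nat, c.2 = (u : Int) := ⟨c.2.toNat, by omega⟩
    have hmn : m < ls.length := by omega
    have hun : u < pvLen ls m := by
      have : c.1.toNat = m := by omega
      rw [this] at h4
      omega
    rw [pvLlist, List.mem_flatMap]
    have hkb : m + 1 < (pvMkP ls (pvMemP live)).length := by rw [pvMkP_length]; omega
    refine ⟨((0 : Int) + ((m + 1 : Nat) : Int), (pvMkP ls (pvMemP live))[m + 1]), ?_, ?_⟩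
    · rw [PySem.List.mem_enumerate_iff]
      exact ⟨m + 1, hkb, rfl⟩
    · have hrow : (pvMkP ls (pvMemP live))[m + 1]'hkb = pvRowP (pvMemP live) (m : Int) (pvLen ls m) := by
        rw [← List.getD_eq_getElem _ ([] : List Int), pvMkP_getD_mid ls _ hmn]
      have hub : u + 1 < ((pvMkP ls (pvMemP live))[m + 1]'hkb).length := by
        rw [hrow, pvRowP_length]; omega
      rw [List.mem_map]
      refine ⟨((0 : Int) + ((u + 1 : Nat) : Int), ((pvMkP ls (pvMemP live))[m + 1]'hkb)[u + 1]), ?_, ?_⟩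
      · rw [List.mem_filter]
        constructor
        · rw [PySem.List.mem_enumerate_iff]
          exact ⟨u + 1, hub, rfl⟩
        · have hPmu : pvMemP live (m : Int) (u : Int) = true := by
            rw [pvMemP, PySem.Set.contains_iff]
            rw [← hm, ← hu]
            exact hc
          have hval : ((pvMkP ls (pvMemP live))[m + 1]'hkb)[u + 1]'hub = 1 := by
            rw [List.getElem_of_eq hrow, ← List.getD_eq_getElem _ (0 : Int),
              pvRowP_getD_mid _ _ hun, hPmu]
            rfl
          rw [hval]
          have htot := pvTot_mkP ls live hB hc
          rw [hm, hu] at htot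
          rw [hm, hu] at hcnt
          rw [Bool.and_eq_true, decide_eq_true_eq]
          refine ⟨by simp, ?_⟩
          rw [show ((0 : Int) + ((m + 1 : Nat) : Int)) = (m : Int) + 1 from by push_cast; ring,
            show ((0 : Int) + ((u + 1 : Nat) : Int)) = (u : Int) + 1 from by push_cast; ring,
            htot]
          omega
      · simp only [Prod.mk.injEq]
        rw [hm, hu]
        constructor <;> push_cast <;> ring

-- membership in B's removable set, given every starved live cell is a candidate
lemma pvRemovable_mem (live cand : List (Int × Int))
    (hcand : ∀ c ∈ live, pvCnt live c.1 c.2 < 4 → c ∈ cand) (x : Int × Int) :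
    x ∈ pvRemovable live cand ↔ x ∈ live ∧ pvCnt live x.1 x.2 < 4 := by
  rw [pvRemovable, PySem.Set.mem_ofList, List.mem_filter]
  constructor
  · rintro ⟨-, hcond⟩
    rw [Bool.and_eq_true, decide_eq_true_eq, PySem.Set.contains_iff] at hcond
    exact hcond
  · rintro ⟨hl, hcnt⟩
    refine ⟨hcand x hl hcnt, ?_⟩
    rw [Bool.and_eq_true, decide_eq_true_eq, PySem.Set.contains_iff]
    exact ⟨hl, hcnt⟩

lemma pvLlist_perm (ls : List String) (live cand : List (Int × Int)) (hB : pvBnd ls live)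
    (hcand : ∀ c ∈ live, pvCnt live c.1 c.2 < 4 → c ∈ cand) :
    (pvLlist (pvMkP ls (pvMemP live))).Perm
      ((pvRemovable live cand).map (fun c => (c.1 + 1, c.2 + 1))) := by
  have hinj : Function.Injective (fun c : Int × Int => (c.1 + 1, c.2 + 1)) := by
    intro a b h
    rw [Prod.mk.injEq] at h
    exact Prod.ext (by omega) (by omega)
  refine (List.perm_ext_iff_of_nodup (pvLlist_nodup _) ?_).mpr ?_
  · exact (PySem.Set.nodup_ofList _).map hinj
  · intro a
    rw [pvLlist_mem ls live hB, List.mem_map]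
    constructor
    · rintro ⟨c, hc, hcnt, rfl⟩
      exact ⟨c, (pvRemovable_mem live cand hcand c).mpr ⟨hc, hcnt⟩, rfl⟩
    · rintro ⟨c, hc, rfl⟩
      obtain ⟨h1, h2⟩ := (pvRemovable_mem live cand hcand c).mp hc
      exact ⟨c, h1, h2, rfl⟩

-- assigning 0 at a padded in-range position updates the predicate pointwise
lemma pvSet_mkP (ls : List String) (P : Int → Int → Bool) {i j : Int} (hi : 0 ≤ i)
    (hin : i < (ls.length : Int)) (hj : 0 ≤ j) (hjn : j < (pvLen ls i.toNat : Int)) :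
    PySem.List.pySetD (pvMkP ls P) (i + 1)
      (PySem.List.pySetD (PySem.List.pyGetD (pvMkP ls P) (i + 1) []) (j + 1) 0) =
    pvMkP ls (fun a b => P a b && !(decide (a = i) && decide (b = j))) := by
  obtain ⟨m, rfl⟩ : ∃ m : Nat, i = (m : Int) := ⟨i.toNat, by omega⟩
  obtain ⟨u, rfl⟩ : ∃ u : Nat, j = (u : Int) := ⟨j.toNat, by omega⟩
  have hm : m < ls.length := by exact_mod_cast hin
  have hu : u < pvLen ls m := by
    have hmt : ((m : Int)).toNat = m := by omega
    rw [hmt] at hjn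
    exact_mod_cast hjn
  have e1 : ((m : Int) + 1) = ((m + 1 : Nat) : Int) := by push_cast; ring
  have e2 : ((u : Int) + 1) = ((u + 1 : Nat) : Int) := by push_cast; ring
  have hb1 : m + 1 < (pvMkP ls P).length := by rw [pvMkP_length]; omega
  have hrow : (pvMkP ls P)[m + 1]'hb1 = pvRowP P (m : Int) (pvLen ls m) := by
    rw [← List.getD_eq_getElem _ ([] : List Int), pvMkP_getD_mid ls P hm]
  rw [e1, e2, PySem.List.pyGetD_natCast, PySem.List.pySetD_natCast, PySem.List.pySetD_natCast,
    List.getD_eq_getElem _ _ hb1, hrow]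
  have hrowset : (pvRowP P (m : Int) (pvLen ls m)).set (u + 1) 0
      = pvRowP (fun a b => P a b && !(decide (a = (m : Int)) && decide (b = (u : Int)))) (m : Int)
          (pvLen ls m) := by
    show ((0 : Int) :: ((List.range (pvLen ls m)).map (pvBit P (m : Int)) ++ [0])).set (u + 1) 0 = _
    rw [List.set_cons_succ, List.set_append]
    have hulen : u < ((List.range (pvLen ls m)).map (pvBit P (m : Int))).length := by simpa using hu
    rw [if_pos hulen]
    have hcells : ((List.range (pvLen ls m)).map (pvBit P (m : Int))).set u 0
        = (List.range (pvLen ls m)).map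
            (pvBit (fun a b => P a b && !(decide (a = (m : Int)) && decide (b = (u : Int)))) (m : Int)) := by
      apply List.ext_getElem
      · simp
      · intro b hb1 hb2
        rw [List.getElem_set]
        simp only [List.getElem_map, List.getElem_range]
        have hbr : b < pvLen ls m := by simpa using hb2
        by_cases hbu : u = b
        · subst hbu
          simp [pvBit]
        · have hne2 : ¬ ((b : Int) = (u : Int)) := by
            intro h
            apply hbu
            exact_mod_cast h.symm
          simp [pvBit, hbu, hne2]
    rw [hcells]
    rfl
  rw [hrowset]
  show ((pvPad ls) :: ((List.range ls.length).map
      (fun (a : Nat) => pvRowP P (a : Int) (pvLen ls a)) ++ [pvPad ls])).set (m + 1) _ = _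
  rw [List.set_cons_succ, List.set_append]
  have hmlen : m < ((List.range ls.length).map (fun (a : Nat) => pvRowP P (a : Int) (pvLen ls a))).length := by
    simpa using hm
  rw [if_pos hmlen]
  have hbody : ((List.range ls.length).map (fun (a : Nat) => pvRowP P (a : Int) (pvLen ls a))).set m
      (pvRowP (fun a b => P a b && !(decide (a = (m : Int)) && decide (b = (u : Int)))) (m : Int)
        (pvLen ls m))
      = (List.range ls.length).map (fun (a : Nat) =>
          pvRowP (fun a b => P a b && !(decide (a = (m : Int)) && decide (b = (u : Int)))) (a : Int)
            (pvLen ls a)) := by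
    apply List.ext_getElem
    · simp
    · intro a ha1 ha2
      rw [List.getElem_set]
      simp only [List.getElem_map, List.getElem_range]
      have har : a < ls.length := by simpa using ha2
      by_cases hma : m = a
      · subst hma
        simp
      · have hne : ¬ ((a : Int) = (m : Int)) := by
          intro h
          apply hma
          exact_mod_cast h.symm
        rw [if_neg hma]
        simp only [pvRowP]
        congr 1
        congr 1
        apply List.map_congr_left
        intro b _
        simp [pvBit, hne]
  rw [hbody]
  rfl

lemma pvRemove_mkP (ls : List String) (P : Int → Int → Bool) (rem : List (Int × Int))
    (hrem : ∀ x ∈ rem, ∃ i j : Int, x = (i + 1, j + 1) ∧ 0 ≤ i ∧ i < (ls.length : Int) ∧ 0 ≤ j ∧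
      j < (pvLen ls i.toNat : Int)) :
    pvRemove (pvMkP ls P) rem = pvMkP ls (fun a b => P a b && !(rem.contains (a + 1, b + 1))) := by
  induction rem generalizing P with
  | nil =>
    show pvMkP ls P = _
    apply pvMkP_congr
    intro a b
    simp
  | cons x rest ih =>
    obtain ⟨i, j, rfl, hi, hin, hj, hjn⟩ := hrem x (List.mem_cons_self)
    simp only [pvRemove, List.foldl_cons]
    have hstep : PySem.List.pySetD (pvMkP ls P) (i + 1, j + 1).1
        (PySem.List.pySetD (PySem.List.pyGetD (pvMkP ls P) (i + 1, j + 1).1 []) (i + 1, j + 1).2 0)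
        = pvMkP ls (fun a b => P a b && !(decide (a = i) && decide (b = j))) :=
      pvSet_mkP ls P hi hin hj hjn
    rw [hstep]
    have ih2 := ih (fun a b => P a b && !(decide (a = i) && decide (b = j)))
      (fun y hy => hrem y (List.mem_cons_of_mem _ hy))
    rw [show pvRemove (pvMkP ls (fun a b => P a b && !(decide (a = i) && decide (b = j)))) rest
        = List.foldl (fun g c => PySem.List.pySetD g c.1
            (PySem.List.pySetD (PySem.List.pyGetD g c.1 []) c.2 0))
          (pvMkP ls (fun a b => P a b && !(decide (a = i) && decide (b = j)))) rest from rfl] at ih2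
    rw [ih2]
    apply pvMkP_congr
    intro a b
    rw [List.contains_cons]
    have hbeq : (((a + 1 : Int), (b + 1 : Int)) == ((i + 1 : Int), (j + 1 : Int)))
        = (decide (a = i) && decide (b = j)) := by
      by_cases ha : a = i <;> by_cases hb : b = j <;> simp [ha, hb, Prod.ext_iff] <;> omega
    rw [hbeq, Bool.and_assoc, ← Bool.not_or]

lemma pvNB_neg {d : Int × Int} (hd : d ∈ pvNB) : (-d.1, -d.2) ∈ pvNB := by
  fin_cases hd <;> simp [pvNB]

lemma pvCnt_congr (l1 l2 : List (Int × Int)) (i j : Int)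
    (h : ∀ d ∈ pvNB, PySem.Set.contains l1 (i + d.1, j + d.2) = PySem.Set.contains l2 (i + d.1, j + d.2)) :
    pvCnt l1 i j = pvCnt l2 i j := by
  have h1 := h (-1, -1) (by simp [pvNB])
  have h2 := h (-1, 0) (by simp [pvNB])
  have h3 := h (-1, 1) (by simp [pvNB])
  have h4 := h (0, -1) (by simp [pvNB])
  have h5 := h (0, 1) (by simp [pvNB])
  have h6 := h (1, -1) (by simp [pvNB])
  have h7 := h (1, 0) (by simp [pvNB])
  have h8 := h (1, 1) (by simp [pvNB])
  simp only [show (i + (-1 : Int)) = i - 1 from by ring, show (j + (-1 : Int)) = j - 1 from by ring,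
    show (i + (0 : Int)) = i from by ring, show (j + (0 : Int)) = j from by ring] at h1 h2 h3 h4 h5 h6 h7 h8
  simp only [pvCnt, h1, h2, h3, h4, h5, h6, h7, h8]

-- frontier completeness: a surviving cell that starves next round lost a neighbour this round
lemma pvFrontier (live rem : List (Int × Int))
    (hmem : ∀ x, x ∈ rem ↔ x ∈ live ∧ pvCnt live x.1 x.2 < 4) :
    ∀ c ∈ PySem.Set.diff live rem, pvCnt (PySem.Set.diff live rem) c.1 c.2 < 4 →
      c ∈ PySem.Set.ofList (rem.flatMap (fun x => pvNB.map (fun d => (x.1 + d.1, x.2 + d.2)))) := by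
  intro c hc hcnt
  obtain ⟨hcl, hcr⟩ := PySem.Set.mem_diff live rem c |>.mp hc
  have h4 : ¬ pvCnt live c.1 c.2 < 4 := fun hlt => hcr ((hmem c).mpr ⟨hcl, hlt⟩)
  have hne : ∃ d ∈ pvNB, PySem.Set.contains (PySem.Set.diff live rem) (c.1 + d.1, c.2 + d.2)
      ≠ PySem.Set.contains live (c.1 + d.1, c.2 + d.2) := by
    by_contra hall
    push_neg at hall
    have := pvCnt_congr (PySem.Set.diff live rem) live c.1 c.2 hall
    omega
  obtain ⟨d, hd, hdne⟩ := hne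
  set x : Int × Int := (c.1 + d.1, c.2 + d.2) with hx
  have hxnd : x ∉ PySem.Set.diff live rem := by
    intro hdiff
    apply hdne
    have hl := ((PySem.Set.mem_diff live rem x).mp hdiff).1
    rw [Bool.eq_iff_iff]
    simp only [PySem.Set.contains_iff]
    exact iff_of_true hdiff hl
  have hxl : x ∈ live := by
    by_contra hl
    apply hdne
    rw [Bool.eq_iff_iff]
    simp only [PySem.Set.contains_iff]
    exact iff_of_false hxnd hl
  have hxrem : x ∈ rem := by
    by_contra hxr
    exact hxnd ((PySem.Set.mem_diff live rem x).mpr ⟨hxl, hxr⟩)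
  rw [PySem.Set.mem_ofList, List.mem_flatMap]
  refine ⟨x, hxrem, ?_⟩
  rw [List.mem_map]
  refine ⟨(-d.1, -d.2), pvNB_neg hd, ?_⟩
  rw [hx]
  exact Prod.ext (by dsimp; ring) (by dsimp; ring)

-- the two loops agree in lockstep
lemma pvLoop_eq (ls : List String) :
    ∀ (fuel : Nat) (live cand : List (Int × Int)) (total : Int), live.Nodup → pvBnd ls live →
      (∀ c ∈ live, pvCnt live c.1 c.2 < 4 → c ∈ cand) →
      pvLoopA fuel (pvMkP ls (pvMemP live)) total = pvLoopB fuel live cand total := by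
  intro fuel
  induction fuel with
  | zero => intro live cand total _ _ _; rfl
  | succ f ih =>
    intro live cand total hnd hB hcand
    have hchar := pvRemovable_mem live cand hcand
    have hperm := pvLlist_perm ls live cand hB hcand
    have hlen : (pvLlist (pvMkP ls (pvMemP live))).length = (pvRemovable live cand).length := by
      rw [hperm.length_eq, List.length_map]
    have hshape : ∀ x ∈ pvLlist (pvMkP ls (pvMemP live)), ∃ i j : Int, x = (i + 1, j + 1) ∧
        0 ≤ i ∧ i < (ls.length : Int) ∧ 0 ≤ j ∧ j < (pvLen ls i.toNat : Int) := by
      intro x hx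
      obtain ⟨c, hc, -, rfl⟩ := (pvLlist_mem ls live hB x).mp hx
      obtain ⟨h1, h2, h3, h4⟩ := hB c hc
      exact ⟨c.1, c.2, rfl, h1, h2, h3, h4⟩
    have hgrid : pvRemove (pvMkP ls (pvMemP live)) (pvLlist (pvMkP ls (pvMemP live)))
        = pvMkP ls (pvMemP (PySem.Set.diff live (pvRemovable live cand))) := by
      rw [pvRemove_mkP ls _ _ hshape]
      apply pvMkP_congr
      intro a b
      have hLc : (((a + 1 : Int), (b + 1 : Int)) ∈ pvLlist (pvMkP ls (pvMemP live)))
          ↔ ((a, b) ∈ pvRemovable live cand) := by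
        rw [hperm.mem_iff, List.mem_map]
        constructor
        · rintro ⟨c, hc, he⟩
          rw [Prod.mk.injEq] at he
          have hc2 : c = (a, b) := Prod.ext (by omega) (by omega)
          rwa [← hc2]
        · intro h
          exact ⟨(a, b), h, rfl⟩
      have hcont : (pvLlist (pvMkP ls (pvMemP live))).contains ((a + 1 : Int), (b + 1 : Int))
          = decide ((a, b) ∈ pvRemovable live cand) := by
        rw [Bool.eq_iff_iff]
        simp only [List.contains_iff_mem, decide_eq_true_eq]
        exact hLc
      rw [hcont]
      by_cases h1 : (a, b) ∈ live <;> by_cases h2 : (a, b) ∈ pvRemovable live cand <;>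
        simp [pvMemP, PySem.Set.contains_iff, PySem.Set.mem_diff, h1, h2]
    simp only [pvLoopA, pvLoopB, pvScan_eq]
    by_cases hz : (pvRemovable live cand).length = 0
    · have hz2 : (pvLlist (pvMkP ls (pvMemP live))).length = 0 := by omega
      have hemp : (pvRemovable live cand).isEmpty = true := by
        rw [List.isEmpty_iff_length_eq_zero]
        exact hz
      simp [hz2, hemp]
    · have hemp : (pvRemovable live cand).isEmpty = false := by
        rw [Bool.eq_false_iff]
        intro h
        exact hz (List.isEmpty_iff_length_eq_zero.mp h)
      have hbeq : (((pvLlist (pvMkP ls (pvMemP live))).length : Int) == 0) = false := by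
        rw [Bool.eq_false_iff]
        intro h
        rw [beq_iff_eq] at h
        omega
      rw [hbeq, hemp]
      simp only [Bool.false_eq_true, if_false]
      rw [hgrid, hlen]
      exact ih (PySem.Set.diff live (pvRemovable live cand)) _ _
        (PySem.Set.nodup_diff _ _ hnd)
        (fun c hc => hB c ((PySem.Set.mem_diff _ _ c).mp hc).1)
        (pvFrontier live (pvRemovable live cand) hchar)

lemma pvAts_mem (puzzle : String) (c : Int × Int) :
    c ∈ pvAts puzzle ↔ ∃ (a b : Nat), c = ((a : Int), (b : Int)) ∧
      ∃ (ha : a < (PySem.Str.splitlines puzzle).length)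
        (hb : b < ((PySem.Str.splitlines puzzle)[a].toList.length)),
        (PySem.Str.splitlines puzzle)[a].toList[b] = '@' := by
  rw [pvAts, PySem.Set.mem_ofList, List.mem_flatMap]
  constructor
  · rintro ⟨p, hp, hpc⟩
    rw [PySem.List.mem_enumerate_iff] at hp
    obtain ⟨a, ha, rfl⟩ := hp
    rw [List.mem_map] at hpc
    obtain ⟨q, hq, rfl⟩ := hpc
    rw [List.mem_filter] at hq
    obtain ⟨hq1, hq2⟩ := hq
    rw [PySem.List.mem_enumerate_iff] at hq1
    obtain ⟨b, hb, rfl⟩ := hq1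
    dsimp only at hq2 ⊢
    rw [beq_iff_eq] at hq2
    exact ⟨a, b, by simp, ha, hb, hq2⟩
  · rintro ⟨a, b, rfl, ha, hb, hat⟩
    refine ⟨((0 : Int) + (a : Int), (PySem.Str.splitlines puzzle)[a]), ?_, ?_⟩
    · rw [PySem.List.mem_enumerate_iff]
      exact ⟨a, ha, rfl⟩
    · rw [List.mem_map]
      refine ⟨((0 : Int) + (b : Int), (PySem.Str.splitlines puzzle)[a].toList[b]), ?_, ?_⟩
      · rw [List.mem_filter]
        refine ⟨?_, ?_⟩
        · rw [PySem.List.mem_enumerate_iff]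
          exact ⟨b, hb, rfl⟩
        · dsimp only
          rw [beq_iff_eq]
          exact hat
      · dsimp only
        rw [Prod.mk.injEq]
        constructor <;> ring

lemma pvAts_bnd (puzzle : String) : pvBnd (PySem.Str.splitlines puzzle) (pvAts puzzle) := by
  intro c hc
  obtain ⟨a, b, rfl, ha, hb, -⟩ := (pvAts_mem puzzle c).mp hc
  dsimp only
  refine ⟨Int.natCast_nonneg a, by exact_mod_cast ha, Int.natCast_nonneg b, ?_⟩
  have hta : ((a : Int)).toNat = a := by omega
  rw [hta, pvLen, List.getD_eq_getElem _ _ ha]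
  exact_mod_cast hb

lemma pvGridA_eq (puzzle : String) (h : PySem.Str.splitlines puzzle ≠ []) :
    pvGridA puzzle = pvMkP (PySem.Str.splitlines puzzle) (pvMemP (pvAts puzzle)) := by
  rw [pvGridA, pvGrid0, pvMkP]
  have hpad : List.replicate (PySem.List.pyGetD ((PySem.Str.splitlines puzzle).map
      (fun s => [0] ++ s.toList.map (fun c => if c == '@' then (1 : Int) else 0) ++ [0])) 0 []).length
        (0 : Int) = pvPad (PySem.Str.splitlines puzzle) := by
    obtain ⟨s, tl, hls⟩ : ∃ s tl, PySem.Str.splitlines puzzle = s :: tl := by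
      cases hx : PySem.Str.splitlines puzzle with
      | nil => exact absurd hx h
      | cons s tl => exact ⟨s, tl, rfl⟩
    rw [hls, pvPad]
    simp [PySem.List.pyGetD_zero]
  have hbody : (PySem.Str.splitlines puzzle).map
      (fun s => [0] ++ s.toList.map (fun c => if c == '@' then (1 : Int) else 0) ++ [0])
      = (List.range (PySem.Str.splitlines puzzle).length).map
          (fun (i : Nat) => pvRowP (pvMemP (pvAts puzzle)) (i : Int)
            (pvLen (PySem.Str.splitlines puzzle) i)) := by
    apply List.ext_getElem
    · simp
    · intro k hk1 hk2
      have hkn : k < (PySem.Str.splitlines puzzle).length := by simpa using hk1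
      simp only [List.getElem_map, List.getElem_range]
      rw [pvRowP]
      have hlenk : pvLen (PySem.Str.splitlines puzzle) k
          = (PySem.Str.splitlines puzzle)[k].toList.length := by
        rw [pvLen, List.getD_eq_getElem _ _ hkn]
      congr 1
      congr 1
      apply List.ext_getElem
      · simp [hlenk]
      · intro b hb1 hb2
        have hbn : b < (PySem.Str.splitlines puzzle)[k].toList.length := by simpa using hb1
        simp only [List.getElem_map, List.getElem_range]
        have hmem : (((k : Nat) : Int), ((b : Nat) : Int)) ∈ pvAts puzzle ↔
            (PySem.Str.splitlines puzzle)[k].toList[b] = '@' := by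
          rw [pvAts_mem]
          constructor
          · rintro ⟨a, b', heq, ha, hb', hat⟩
            rw [Prod.mk.injEq] at heq
            have hak : a = k := by omega
            have hbb : b' = b := by omega
            subst hak
            subst hbb
            exact hat
          · intro hat
            exact ⟨k, b, rfl, hkn, hbn, hat⟩
        rw [pvBit, pvMemP]
        by_cases hat : (PySem.Str.splitlines puzzle)[k].toList[b] = '@'
        · simp [hat, hmem.mpr hat]
        · have hnm : ¬ ((((k : Nat) : Int), ((b : Nat) : Int)) ∈ pvAts puzzle) := fun hm => hat (hmem.mp hm)
          simp [hat, hnm]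
  rw [hpad, hbody]



-- ===== VERDICT (by name: the statement is the Claim_ definition above) =====
theorem part2_spec : Claim_equal_part2 := by
  intro puzzle hdom hpre
  obtain ⟨hne, -⟩ := hpre
  show part2 puzzle = part2_alt puzzle
  rw [part2, part2_alt]
  rw [pvGridA_eq puzzle hne]
  exact pvLoop_eq (PySem.Str.splitlines puzzle) (puzzle.toList.length + 1) (pvAts puzzle)
    (PySem.Set.ofList (pvAts puzzle)) 0 (PySem.Set.nodup_ofList _) (pvAts_bnd puzzle)
    (fun c hc _ => (PySem.Set.mem_ofList _ c).mpr hc)
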